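-- pv_equiv track=rewrite | github.com/yuraboruk/MyLabRepo | RecTool/ReconciliationTool.py | dupSearch
-- ===== SOURCE A (Python) =====
-- def dupSearch (rawDataInApp, rawDataInAppOld):
--     resList = [[""],
--                ["Duplicates found in both App files"],
--                [""],
--                ["Transaction", "Date in Old App", "Date in New App", "Amount"]]
--
--     for dataInApp in rawDataInApp:
--         for dataInOldApp in rawDataInAppOld:
--             if dataInApp [0] != "Transaction" and dataInApp [0] == dataInOldApp [0] and dataInApp[2] == dataInOldApp [2]:
--                 resList.append ([dataInApp[0], dataInOldApp[1], dataInApp[1], dataInApp [2]])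
--
--     return resList
-- ===== SOURCE B (Python) =====
-- def dupSearch(rawDataInApp, rawDataInAppOld):
--     resList = [[""],
--                ["Duplicates found in both App files"],
--                [""],
--                ["Transaction", "Date in Old App", "Date in New App", "Amount"]]
--     index = {}
--     for old in rawDataInAppOld:
--         if len(old) >= 3:
--             index.setdefault((old[0], old[2]), []).append(old[1])
--     for row in rawDataInApp:
--         if len(row) >= 3 and row[0] != "Transaction":
--             for oldDate in index.get((row[0], row[2]), []):
--                 resList.append([row[0], oldDate, row[1], row[2]])
--     return resList
-- ===== Notes on version B (the rewrite author's own statement) =====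
-- stated objective: alternative
-- what changed: Replaced the O(n*m) nested-loop join with a one-pass index over the old rows keyed by (transaction, amount) mapping to the ordered list of old dates, then one lookup per app row; intended as faster, but a timing run measured only 1.28x at the largest size, so no speed is claimed.
import Mathlib
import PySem

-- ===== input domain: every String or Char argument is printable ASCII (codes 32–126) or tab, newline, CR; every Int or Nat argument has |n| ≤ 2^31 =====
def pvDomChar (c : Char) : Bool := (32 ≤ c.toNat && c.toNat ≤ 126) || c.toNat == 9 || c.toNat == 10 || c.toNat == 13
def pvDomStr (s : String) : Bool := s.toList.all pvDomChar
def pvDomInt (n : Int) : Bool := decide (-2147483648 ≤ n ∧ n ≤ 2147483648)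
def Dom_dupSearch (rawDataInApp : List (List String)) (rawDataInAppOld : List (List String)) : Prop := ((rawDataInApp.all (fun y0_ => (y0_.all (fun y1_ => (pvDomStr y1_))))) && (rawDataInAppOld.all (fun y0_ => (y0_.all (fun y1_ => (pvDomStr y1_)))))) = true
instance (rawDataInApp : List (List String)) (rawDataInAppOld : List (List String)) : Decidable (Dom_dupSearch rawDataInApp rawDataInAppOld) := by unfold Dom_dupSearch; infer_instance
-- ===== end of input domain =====

-- B replaces A's nested-loop join with a dict index over the old rows keyed by
-- (transaction, amount), built once, then one lookup per app row (intended as faster;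
-- measured only 1.28x at the largest timed size, so no speed is claimed).

-- shared cell accessor: Python's r[i]; total via getD, but Pre_ keeps every access in range
def pvCell (r : List String) (i : Int) : String := (PySem.List.pyGet? r i).getD ""

def pvHeader : List (List String) :=
  [[""], ["Duplicates found in both App files"], [""],
   ["Transaction", "Date in Old App", "Date in New App", "Amount"]]

-- ===== PORT A =====
def dupSearch (rawDataInApp : List (List String)) (rawDataInAppOld : List (List String)) : List (List String) :=
  rawDataInApp.foldl (fun res r =>
    rawDataInAppOld.foldl (fun res s =>
      if pvCell r 0 ≠ "Transaction" ∧ pvCell r 0 = pvCell s 0 ∧ pvCell r 2 = pvCell s 2 then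
        res ++ [[pvCell r 0, pvCell s 1, pvCell r 1, pvCell r 2]]
      else res) res) pvHeader

-- ===== PORT B =====
-- index.setdefault((s[0], s[2]), []).append(s[1])  ==  modify key [] (· ++ [s[1]])
def pvIndex (rawDataInAppOld : List (List String)) : PySem.Dict (String × String) (List String) :=
  rawDataInAppOld.foldl (fun d s =>
    if 3 ≤ s.length then d.modify (pvCell s 0, pvCell s 2) [] (· ++ [pvCell s 1]) else d)
    PySem.Dict.empty

def dupSearch_alt (rawDataInApp : List (List String)) (rawDataInAppOld : List (List String)) : List (List String) :=
  let idx := pvIndex rawDataInAppOld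
  rawDataInApp.foldl (fun res r =>
    if 3 ≤ r.length ∧ pvCell r 0 ≠ "Transaction" then
      (idx.getD (pvCell r 0, pvCell r 2) []).foldl
        (fun res d => res ++ [[pvCell r 0, d, pvCell r 1, pvCell r 2]]) res
    else res) pvHeader

-- ===== PRECONDITION & SPEC =====
-- Pre_ is exactly the set of inputs on which the Python A returns normally: A raises
-- IndexError as soon as it reads index 0 of an empty row it reaches, or index 2 of a
-- matching row shorter than 3 fields.
def Pre_dupSearch (rawDataInApp : List (List String)) (rawDataInAppOld : List (List String)) : Prop :=
  ∀ r ∈ rawDataInApp, rawDataInAppOld = [] ∨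
    (1 ≤ r.length ∧ ∀ s ∈ rawDataInAppOld,
      pvCell r 0 = "Transaction" ∨
      (1 ≤ s.length ∧ (pvCell r 0 ≠ pvCell s 0 ∨ (3 ≤ r.length ∧ 3 ≤ s.length))))
instance (rawDataInApp : List (List String)) (rawDataInAppOld : List (List String)) : Decidable (Pre_dupSearch rawDataInApp rawDataInAppOld) := by unfold Pre_dupSearch; infer_instance

def pvWitness_dupSearch : List (List String) × List (List String) :=
  ([["T1", "d2", "10"], ["T2", "d2", "20"]], [["T1", "d1", "10"]])

def Spec_dupSearch (rawDataInApp : List (List String)) (rawDataInAppOld : List (List String)) (out : List (List String)) : Prop := out = dupSearch_alt rawDataInApp rawDataInAppOld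
instance (rawDataInApp : List (List String)) (rawDataInAppOld : List (List String)) (out : List (List String)) : Decidable (Spec_dupSearch rawDataInApp rawDataInAppOld out) := by unfold Spec_dupSearch; infer_instance

-- ===== CLAIM (what is proved, stated in full; the proofs are below) =====
def Claim_equal_dupSearch : Prop := ∀ (rawDataInApp : List (List String)) (rawDataInAppOld : List (List String)), Dom_dupSearch rawDataInApp rawDataInAppOld → Pre_dupSearch rawDataInApp rawDataInAppOld → Spec_dupSearch rawDataInApp rawDataInAppOld (dupSearch rawDataInApp rawDataInAppOld)

-- ===== LEMMAS AND PROOFS =====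

-- characterisation of B's index: lookup at k = the dates of the ≥3-field old rows keyed k, in order
theorem pvIndex_getD (old : List (List String)) (k : String × String) :
    (pvIndex old).getD k [] =
      ((old.filter (fun s => decide (3 ≤ s.length))).filter
        (fun s => (pvCell s 0, pvCell s 2) == k)).map (fun s => pvCell s 1) := by
  unfold pvIndex
  rw [PySem.List.foldl_ite_eq_foldl_filter]
  have h : (List.filter (fun x => decide (3 ≤ x.length)) old).foldl
      (fun d s => d.modify (pvCell s 0, pvCell s 2) [] (· ++ [pvCell s 1])) PySem.Dict.empty
    = ((List.filter (fun x => decide (3 ≤ x.length)) old).map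
        (fun s => ((pvCell s 0, pvCell s 2), pvCell s 1))).foldl
        (fun d p => d.modify p.1 [] (· ++ [p.2])) PySem.Dict.empty :=
    by rw [List.foldl_map]
  rw [h, PySem.Dict.getD_foldl_modify_append, PySem.Dict.getD_empty]
  simp [List.filter_map, Function.comp_def]

-- A's inner loop over old, as append of a filtered map
theorem dupSearch_inner (old : List (List String)) (r : List String) (res : List (List String)) :
    old.foldl (fun res s =>
      if pvCell r 0 ≠ "Transaction" ∧ pvCell r 0 = pvCell s 0 ∧ pvCell r 2 = pvCell s 2 then
        res ++ [[pvCell r 0, pvCell s 1, pvCell r 1, pvCell r 2]]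
      else res) res
    = res ++ ((old.filter (fun s => decide (pvCell r 0 ≠ "Transaction" ∧ pvCell r 0 = pvCell s 0 ∧ pvCell r 2 = pvCell s 2))).map
        (fun s => [pvCell r 0, pvCell s 1, pvCell r 1, pvCell r 2])) := by
  exact PySem.List.foldl_append_ite _ _ _ _

-- ===== VERDICT (by name: the statement is the Claim_ definition above) =====
theorem dupSearch_spec : Claim_equal_dupSearch := by
  intro app old _ pre
  unfold Spec_dupSearch
  simp only [dupSearch, dupSearch_alt]
  apply PySem.List.foldl_congr_mem
  intro res r hr
  rw [dupSearch_inner]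
  by_cases hq : 3 ≤ r.length ∧ pvCell r 0 ≠ "Transaction"
  · rw [if_pos hq, pvIndex_getD]
    rw [PySem.List.foldl_append_singleton_eq_map]
    rw [List.map_map, List.filter_filter]
    have hfil : List.filter (fun s => decide (pvCell r 0 ≠ "Transaction" ∧ pvCell r 0 = pvCell s 0 ∧ pvCell r 2 = pvCell s 2)) old
        = List.filter (fun a => ((pvCell a 0, pvCell a 2) == (pvCell r 0, pvCell r 2)) && decide (3 ≤ a.length)) old := by
      apply List.filter_congr
      intro s hs
      rw [Bool.eq_iff_iff]
      simp only [decide_eq_true_eq, Bool.and_eq_true, beq_iff_eq, Prod.mk.injEq]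
      rcases pre r hr with hold | ⟨-, hall⟩
      · exact absurd hs (by simp [hold])
      rcases hall s hs with hT | ⟨-, hne | ⟨hr3, hs3⟩⟩
      · exact absurd hT hq.2
      · constructor
        · rintro ⟨-, h0, -⟩; exact absurd h0 hne
        · rintro ⟨⟨h0, -⟩, -⟩; exact absurd h0.symm hne
      · constructor
        · rintro ⟨-, h0, h2⟩; exact ⟨⟨h0.symm, h2.symm⟩, hs3⟩
        · rintro ⟨⟨h0, h2⟩, -⟩; exact ⟨hq.2, h0.symm, h2.symm⟩
    rw [hfil]
    simp [Function.comp_def]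
  · rw [if_neg hq]
    have hnil : (old.filter (fun s => decide (pvCell r 0 ≠ "Transaction" ∧ pvCell r 0 = pvCell s 0 ∧ pvCell r 2 = pvCell s 2))) = [] := by
      apply List.filter_eq_nil_iff.mpr
      intro s hs
      simp only [decide_eq_true_eq, not_and]
      intro hT h0
      rcases pre r hr with hold | ⟨-, hall⟩
      · exact absurd hs (by simp [hold])
      rcases hall s hs with hT' | ⟨-, hne | ⟨hr3, -⟩⟩
      · exact absurd hT' hT
      · exact absurd h0 hne
      · exact absurd ⟨hr3, hT⟩ hq
    rw [hnil]; simp
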